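-- pv_equiv track=rewrite | github.com/catlee/adventofcode | 2019/python/25/25.py | find_doors
-- ===== SOURCE A (Python) =====
-- def find_doors(s):
--     rv = []
--     looking = False
--     for line in s.split("\n"):
--         if not line.strip():
--             looking = False
--         elif looking:
--             direction = line[2:].strip()
--             rv.append(direction)
--         elif line.startswith("Doors here lead:"):
--             looking = True
--
--     return rv
-- ===== SOURCE B (Python) =====
-- def find_doors(s):
--     # Phase 1: partition the lines into blocks separated by whitespace-only lines.
--     blocks = []
--     block = []
--     for line in s.split("\n"):
--         if line.strip():
--             block.append(line)
--         elif block: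
--             blocks.append(block)
--             block = []
--     if block:
--         blocks.append(block)
--     # Phase 2: in each block, everything after the first header line is a door.
--     rv = []
--     for block in blocks:
--         for i, line in enumerate(block):
--             if line.startswith("Doors here lead:"):
--                 rv += [l[2:].strip() for l in block[i + 1:]]
--                 break
--     return rv
-- ===== Notes on version B (the rewrite author's own statement) =====
-- stated objective: alternative
-- what changed: Replaces A's flag-driven single-pass state machine with a two-phase structure: first partition the lines into blocks delimited by whitespace-only lines, then in each block emit line[2:].strip() for every line after the first 'Doors here lead:' header.
import Mathlib
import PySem

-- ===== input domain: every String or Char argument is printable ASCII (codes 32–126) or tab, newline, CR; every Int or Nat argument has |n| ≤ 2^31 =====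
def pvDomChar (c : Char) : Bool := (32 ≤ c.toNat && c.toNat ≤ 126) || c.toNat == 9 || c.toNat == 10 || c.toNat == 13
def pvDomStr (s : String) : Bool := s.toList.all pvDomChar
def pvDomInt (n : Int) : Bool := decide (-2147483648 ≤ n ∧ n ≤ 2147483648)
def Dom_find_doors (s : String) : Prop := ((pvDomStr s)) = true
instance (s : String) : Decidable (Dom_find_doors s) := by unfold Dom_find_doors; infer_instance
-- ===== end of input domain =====

-- B replaces A's flag-driven one-pass state machine by a partition-into-blocks-then-extract
-- two-phase structure (alternative decomposition, same asymptotic cost).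

-- ===== PORT A =====
-- the for-loop of A, carrying the accumulator rv and the flag `looking`
def find_doors_go (lines : List String) (rv : List String) (looking : Bool) : List String :=
  match lines with
  | [] => rv
  | line :: rest =>
    if PySem.Str.strip line = "" then
      find_doors_go rest rv false
    else if looking then
      find_doors_go rest (rv ++ [PySem.Str.strip (PySem.Str.slice line (some 2) none)]) true
    else if PySem.Str.startswith line "Doors here lead:" then
      find_doors_go rest rv true
    else
      find_doors_go rest rv looking

def find_doors (s : String) : List String :=
  find_doors_go ((PySem.Str.split? s "\n").getD []) [] false

-- ===== PORT B =====
-- phase 1 of Source B: partition the lines into blocks delimited by whitespace-only lines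
def pvBlocks (lines : List String) (block : List String) : List (List String) :=
  match lines with
  | [] => if block = [] then [] else [block]
  | line :: rest =>
    if PySem.Str.strip line = "" then
      if block = [] then pvBlocks rest block else block :: pvBlocks rest []
    else
      pvBlocks rest (block ++ [line])

-- phase 2 of Source B (inner loop with break): doors of one block = every line after the first header
def pvExtract (block : List String) : List String :=
  match block with
  | [] => []
  | line :: rest =>
    if PySem.Str.startswith line "Doors here lead:" then
      rest.map (fun l => PySem.Str.strip (PySem.Str.slice l (some 2) none))
    else
      pvExtract rest

def find_doors_alt (s : String) : List String :=
  (pvBlocks ((PySem.Str.split? s "\n").getD []) []).foldl (fun rv b => rv ++ pvExtract b) []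

-- ===== PRECONDITION & SPEC =====
def Spec_find_doors (s : String) (out : List String) : Prop := out = find_doors_alt s
instance (s : String) (out : List String) : Decidable (Spec_find_doors s out) := by unfold Spec_find_doors; infer_instance

-- ===== CLAIM (what is proved, stated in full; the proofs are below) =====
def Claim_equal_find_doors : Prop := ∀ (s : String), Dom_find_doors s → Spec_find_doors s (find_doors s)

-- ===== LEMMAS AND PROOFS =====

-- nonblank test, as a Bool predicate for takeWhile/dropWhile
def pvNB (l : String) : Bool := !(PySem.Str.strip l == "")

def pvExt (l : String) : String := PySem.Str.strip (PySem.Str.slice l (some 2) none)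

-- equation lemmas for the two loops, stated on the Str level
theorem go_blank (line : String) (rest rv : List String) (lk : Bool)
    (h : PySem.Str.strip line = "") :
    find_doors_go (line :: rest) rv lk = find_doors_go rest rv false := by
  simp [find_doors_go, h]

theorem go_look (line : String) (rest rv : List String)
    (h : ¬ PySem.Str.strip line = "") :
    find_doors_go (line :: rest) rv true = find_doors_go rest (rv ++ [pvExt line]) true := by
  simp [find_doors_go, h, pvExt]

theorem go_hdr (line : String) (rest rv : List String)
    (h : ¬ PySem.Str.strip line = "") (hh : PySem.Str.startswith line "Doors here lead:" = true) :
    find_doors_go (line :: rest) rv false = find_doors_go rest rv true := by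
  simp at hh
  simp [find_doors_go, h, hh]

theorem go_nohdr (line : String) (rest rv : List String)
    (h : ¬ PySem.Str.strip line = "") (hh : PySem.Str.startswith line "Doors here lead:" = false) :
    find_doors_go (line :: rest) rv false = find_doors_go rest rv false := by
  simp at hh
  simp [find_doors_go, h, hh]

theorem blocks_blank (line : String) (rest block : List String)
    (h : PySem.Str.strip line = "") :
    pvBlocks (line :: rest) block
      = if block = [] then pvBlocks rest [] else block :: pvBlocks rest [] := by
  by_cases hb : block = [] <;> simp [pvBlocks, h, hb]

theorem blocks_nonblank (line : String) (rest block : List String)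
    (h : ¬ PySem.Str.strip line = "") :
    pvBlocks (line :: rest) block = pvBlocks rest (block ++ [line]) := by
  simp [pvBlocks, h]

theorem extract_hdr (line : String) (rest : List String)
    (hh : PySem.Str.startswith line "Doors here lead:" = true) :
    pvExtract (line :: rest) = rest.map pvExt := by
  simp at hh
  simp [pvExtract, hh, pvExt]

theorem extract_nohdr (line : String) (rest : List String)
    (hh : PySem.Str.startswith line "Doors here lead:" = false) :
    pvExtract (line :: rest) = pvExtract rest := by
  simp at hh
  simp [pvExtract, hh]

theorem nb_iff (line : String) : pvNB line = true ↔ ¬ PySem.Str.strip line = "" := by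
  simp [pvNB]

theorem find_doors_go_acc (lines : List String) :
    ∀ rv looking, find_doors_go lines rv looking = rv ++ find_doors_go lines [] looking := by
  induction lines with
  | nil => intro rv looking; simp [find_doors_go]
  | cons line rest ih =>
    intro rv looking
    by_cases h : PySem.Str.strip line = ""
    · rw [go_blank line rest rv looking h, go_blank line rest [] looking h]; exact ih rv false
    · cases looking with
      | true =>
        rw [go_look line rest rv h, go_look line rest [] h, ih (rv ++ [pvExt line]),
          ih ([] ++ [pvExt line])]
        simp
      | false =>
        rcases Bool.eq_false_or_eq_true (PySem.Str.startswith line "Doors here lead:")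
          with hh | hh
        · rw [go_hdr line rest rv h hh, go_hdr line rest [] h hh]; exact ih rv true
        · rw [go_nohdr line rest rv h hh, go_nohdr line rest [] h hh]; exact ih rv false

theorem find_doors_go_true (lines : List String) :
    find_doors_go lines [] true =
      (lines.takeWhile pvNB).map pvExt ++ find_doors_go (lines.dropWhile pvNB) [] false := by
  induction lines with
  | nil => simp [find_doors_go]
  | cons line rest ih =>
    by_cases h : PySem.Str.strip line = ""
    · have hnb : pvNB line = false := by simp [pvNB, h]
      rw [go_blank line rest [] true h]
      simp only [List.takeWhile_cons, List.dropWhile_cons, hnb, Bool.false_eq_true, if_false,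
        List.map_nil, List.nil_append]
      rw [go_blank line rest [] false h]
    · have hnb : pvNB line = true := (nb_iff line).mpr h
      rw [go_look line rest [] h, find_doors_go_acc rest ([] ++ [pvExt line]) true, ih]
      simp only [List.takeWhile_cons, List.dropWhile_cons, hnb, if_true, List.map_cons]
      simp

theorem pvBlocks_ne (lines : List String) :
    ∀ block, block ≠ [] →
      pvBlocks lines block =
        (block ++ lines.takeWhile pvNB) :: pvBlocks (lines.dropWhile pvNB) [] := by
  induction lines with
  | nil => intro block hb; simp [pvBlocks, hb]
  | cons line rest ih =>
    intro block hb
    by_cases h : PySem.Str.strip line = ""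
    · have hnb : pvNB line = false := by simp [pvNB, h]
      rw [blocks_blank line rest block h, if_neg hb]
      simp only [List.takeWhile_cons, List.dropWhile_cons, hnb, Bool.false_eq_true, if_false,
        List.append_nil]
      rw [blocks_blank line rest [] h, if_pos rfl]
    · have hnb : pvNB line = true := (nb_iff line).mpr h
      rw [blocks_nonblank line rest block h, ih (block ++ [line]) (by simp)]
      simp only [List.takeWhile_cons, List.dropWhile_cons, hnb, if_true]
      simp

theorem pvExtract_append (b1 : List String)
    (h : ∀ l ∈ b1, PySem.Str.startswith l "Doors here lead:" = false) :
    ∀ b2, pvExtract (b1 ++ b2) = pvExtract b2 := by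
  induction b1 with
  | nil => intro b2; simp
  | cons line rest ih =>
    intro b2
    rw [List.cons_append, extract_nohdr line (rest ++ b2) (h line (by simp))]
    exact ih (fun l hl => h l (List.mem_cons_of_mem _ hl)) b2

theorem pvExtract_nohdr_nil (b : List String)
    (h : ∀ l ∈ b, PySem.Str.startswith l "Doors here lead:" = false) :
    pvExtract b = [] := by
  rw [← List.append_nil b, pvExtract_append b h]
  rfl

theorem main_lemma (n : Nat) :
    ∀ (lines : List String), lines.length ≤ n →
    ∀ (block : List String),
      (∀ l ∈ block, PySem.Str.startswith l "Doors here lead:" = false) →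
      find_doors_go lines [] false = (pvBlocks lines block).flatMap pvExtract := by
  induction n with
  | zero =>
    intro lines hlen block hblock
    have : lines = [] := List.eq_nil_of_length_eq_zero (Nat.le_zero.mp hlen)
    subst this
    by_cases hb : block = []
    · simp [find_doors_go, pvBlocks, hb]
    · simp [find_doors_go, pvBlocks, hb, pvExtract_nohdr_nil block hblock]
  | succ n ih =>
    intro lines hlen block hblock
    match lines with
    | [] =>
      by_cases hb : block = []
      · simp [find_doors_go, pvBlocks, hb]
      · simp [find_doors_go, pvBlocks, hb, pvExtract_nohdr_nil block hblock]
    | line :: rest =>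
      have hrest : rest.length ≤ n := by simpa using Nat.succ_le_succ_iff.mp hlen
      by_cases h : PySem.Str.strip line = ""
      · rw [go_blank line rest [] false h, blocks_blank line rest block h]
        by_cases hb : block = []
        · rw [if_pos hb]; exact ih rest hrest [] (by simp)
        · rw [if_neg hb]
          simp only [List.flatMap_cons, pvExtract_nohdr_nil block hblock, List.nil_append]
          exact ih rest hrest [] (by simp)
      · rcases Bool.eq_false_or_eq_true (PySem.Str.startswith line "Doors here lead:")
          with hh | hh
        · rw [go_hdr line rest [] h hh, find_doors_go_true,
            blocks_nonblank line rest block h, pvBlocks_ne rest (block ++ [line]) (by simp)]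
          have hdrop : (rest.dropWhile pvNB).length ≤ n :=
            le_trans (List.length_dropWhile_le _ _) hrest
          rw [ih (rest.dropWhile pvNB) hdrop [] (by simp)]
          have hext : pvExtract (block ++ line :: rest.takeWhile pvNB)
              = (rest.takeWhile pvNB).map pvExt := by
            rw [pvExtract_append block hblock, extract_hdr line (rest.takeWhile pvNB) hh]
          simp [hext]
        · rw [go_nohdr line rest [] h hh, blocks_nonblank line rest block h]
          exact ih rest hrest (block ++ [line])
            (by intro l hl
                rcases List.mem_append.mp hl with h1 | h1
                · exact hblock l h1
                · simp at h1; subst h1; exact hh)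

-- ===== VERDICT (by name: the statement is the Claim_ definition above) =====
theorem find_doors_spec : Claim_equal_find_doors := by
  intro s _
  unfold Spec_find_doors find_doors find_doors_alt
  rw [PySem.List.foldl_append_eq_flatMap, List.nil_append]
  exact main_lemma _ _ (le_refl _) [] (by simp)
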